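-- pv_equiv track=rewrite | github.com/AlbertoV5/Waveform | ParsonsCode/zbk/1/parsons.py | LoudestBand
-- ===== SOURCE A (Python) =====
-- def LoudestBand(x,y):
--     highest = []
--     for i in range(len(y)):
--         m = max(y[i])
--         ind = y[i].index(m)
--         freq = x[ind]
--         highest.append(freq)
--     return highest
-- ===== SOURCE B (Python) =====
-- def LoudestBand(x, y):
--     # Sort each row's index list by descending value (stable sort keeps the
--     # first-occurring maximum in front), then take the front index into x.
--     return [x[sorted(range(len(row)), key=lambda j: -row[j])[0]] for row in y]
-- ===== Notes on version B (the rewrite author's own statement) =====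
-- stated objective: alternative
-- what changed: Instead of A's two linear scans per row (max() then .index()), B sorts each row's index list by descending value with a stable sort, so the first index of the sorted order is the first-occurring maximum, and indexes x with it; the per-row loop becomes a comprehension.
import Mathlib
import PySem

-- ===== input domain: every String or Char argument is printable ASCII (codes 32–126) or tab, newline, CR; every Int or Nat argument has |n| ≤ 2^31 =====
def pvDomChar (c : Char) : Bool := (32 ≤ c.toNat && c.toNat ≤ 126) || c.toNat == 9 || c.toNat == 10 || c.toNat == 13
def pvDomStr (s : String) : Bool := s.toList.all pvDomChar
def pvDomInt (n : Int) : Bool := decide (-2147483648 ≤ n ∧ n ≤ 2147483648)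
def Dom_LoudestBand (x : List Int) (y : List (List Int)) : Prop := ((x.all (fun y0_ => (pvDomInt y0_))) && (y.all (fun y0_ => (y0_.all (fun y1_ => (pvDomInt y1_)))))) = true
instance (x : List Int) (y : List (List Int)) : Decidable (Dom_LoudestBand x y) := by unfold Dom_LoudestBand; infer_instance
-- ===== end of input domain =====

-- B replaces A's two scans per row (max() then .index()) by stably sorting the row's
-- index list by descending value and taking the front index (objective: alternative algorithm).


-- ===== PORT A =====
-- per row: m = max(row); ind = row.index(m); freq = x[ind]; append freq.
-- none-branches are totality guards for the inputs (excluded by Pre_) where Python raises.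
def pvRowA (x : List Int) (highest : List Int) (row : List Int) : List Int :=
  match PySem.List.max? row (fun v => v) with
  | none => highest                                  -- max([]) raises ValueError
  | some m =>
    match PySem.List.index? row m with
    | none => highest                                -- unreachable: m is an element of row
    | some ind =>
      match PySem.List.pyGet? x (ind : Int) with
      | none => highest                              -- x[ind] raises IndexError
      | some freq => highest ++ [freq]

def LoudestBand (x : List Int) (y : List (List Int)) : List Int :=
  y.foldl (pvRowA x) []

-- ===== PORT B =====
-- per row: x[sorted(range(len(row)), key=lambda j: -row[j])[0]]
-- the .getD 0 inside the key is a totality guard only: j comes from range(len(row)),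
-- so row[j] never raises in Python; the other guard values cover inputs excluded by Pre_.
def pvRowB (x : List Int) (row : List Int) : Int :=
  let order := PySem.List.sorted (PySem.List.pyRange 0 (row.length : Int))
      (fun j => -((PySem.List.pyGet? row j).getD 0)) false
  match PySem.List.pyGet? order (0 : Int) with
  | none => 0                                        -- order[0] raises IndexError (empty row)
  | some ind => (PySem.List.pyGet? x ind).getD 0     -- x[ind] raises IndexError when out of range

def LoudestBand_alt (x : List Int) (y : List (List Int)) : List Int :=
  y.map (pvRowB x)

-- ===== PRECONDITION & SPEC =====
-- A row is admissible when it is nonempty and the index of its first maximum is a valid index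
-- into x (otherwise Python A raises ValueError resp. IndexError; B raises there too).
def PreRow_LoudestBand (x : List Int) (r : List Int) : Prop :=
  ∃ i : Nat, i < r.length ∧ i < x.length ∧
    (∀ j, j < i → r[j]! < r[i]!) ∧ (∀ j, j < r.length → r[j]! ≤ r[i]!)


-- Pre_ excludes exactly the inputs where Python A raises: an empty row (ValueError from max)
-- or a row whose first-maximum index is out of range for x (IndexError).
def Pre_LoudestBand (x : List Int) (y : List (List Int)) : Prop :=
  ∀ r ∈ y, PreRow_LoudestBand x r
instance (x : List Int) (y : List (List Int)) : Decidable (Pre_LoudestBand x y) := by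
  unfold Pre_LoudestBand PreRow_LoudestBand; infer_instance

def pvWitness_LoudestBand : List Int × List (List Int) := ([5, 7, 9], [[1, 3, 2], [4, 4]])

def Spec_LoudestBand (x : List Int) (y : List (List Int)) (out : List Int) : Prop := out = LoudestBand_alt x y
instance (x : List Int) (y : List (List Int)) (out : List Int) : Decidable (Spec_LoudestBand x y out) := by unfold Spec_LoudestBand; infer_instance

-- ===== CLAIM (what is proved, stated in full; the proofs are below) =====
def Claim_equal_LoudestBand : Prop := ∀ (x : List Int) (y : List (List Int)), Dom_LoudestBand x y → Pre_LoudestBand x y → Spec_LoudestBand x y (LoudestBand x y)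

-- ===== LEMMAS AND PROOFS =====

-- reference recursion: scan a tail of the row keeping (best value, index of its first occurrence)
def pvScan : List Int → Int → Int → Int → Int × Int
  | [], best, ind, _ => (best, ind)
  | v :: t, best, ind, pos =>
      if best < v then pvScan t v pos (pos + 1) else pvScan t best ind (pos + 1)

lemma pvScan_fst : ∀ (t : List Int) (best ind pos : Int),
    (pvScan t best ind pos).1 = t.foldl max best := by
  intro t
  induction t with
  | nil => intro best ind pos; simp [pvScan]
  | cons v t ih =>
      intro best ind pos
      simp only [pvScan, List.foldl_cons]
      by_cases h : best < v
      · rw [if_pos h, ih]; congr 1; omega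
      · rw [if_neg h, ih]; congr 1; omega

lemma pvScan_spec : ∀ (t : List Int) (best ind pos b i : Int), pvScan t best ind pos = (b, i) →
    best ≤ b ∧ (∀ v ∈ t, v ≤ b) ∧
    (b = best → i = ind) ∧
    (best < b → ∃ k : Nat, k < t.length ∧ i = pos + k ∧ t[k]! = b ∧ ∀ j, j < k → t[j]! < b) := by
  intro t
  induction t with
  | nil =>
      intro best ind pos b i h
      simp only [pvScan, Prod.mk.injEq] at h
      obtain ⟨rfl, rfl⟩ := h
      exact ⟨le_refl _, by simp, fun _ => rfl, fun hb => absurd hb (lt_irrefl _)⟩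
  | cons v t ih =>
      intro best ind pos b i h
      simp only [pvScan] at h
      by_cases hv : best < v
      · rw [if_pos hv] at h
        obtain ⟨h1, h2, h3, h4⟩ := ih v pos (pos + 1) b i h
        refine ⟨le_trans hv.le h1, ?_, ?_, ?_⟩
        · intro w hw
          rcases List.mem_cons.mp hw with rfl | hw
          · exact h1
          · exact h2 w hw
        · intro hb; exfalso; omega
        · intro _
          by_cases hvb : v < b
          · obtain ⟨k, hk, hik, hek, hlt⟩ := h4 hvb
            refine ⟨k + 1, by simpa using Nat.succ_lt_succ hk, by push_cast; omega, by simpa using hek, ?_⟩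
            intro j hj
            cases j with
            | zero => simpa using hvb
            | succ j' => simpa using hlt j' (by omega)
          · have hbv : b = v := le_antisymm (not_lt.mp hvb) h1
            refine ⟨0, by simp, by simpa using h3 hbv, by simpa using hbv.symm, ?_⟩
            intro j hj; omega
      · rw [if_neg hv] at h
        obtain ⟨h1, h2, h3, h4⟩ := ih best ind (pos + 1) b i h
        refine ⟨h1, ?_, h3, ?_⟩
        · intro w hw
          rcases List.mem_cons.mp hw with rfl | hw
          · exact le_trans (not_lt.mp hv) h1
          · exact h2 w hw
        · intro hb
          obtain ⟨k, hk, hik, hek, hlt⟩ := h4 hb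
          refine ⟨k + 1, by simpa using Nat.succ_lt_succ hk, by push_cast; omega, by simpa using hek, ?_⟩
          intro j hj
          cases j with
          | zero => simpa using lt_of_le_of_lt (not_lt.mp hv) hb
          | succ j' => simpa using hlt j' (by omega)

-- the scan over the tail yields the first-argmax of the whole row
lemma pv_scan_argmax (h : Int) (t : List Int) (b i : Int) (hs : pvScan t h 0 1 = (b, i)) :
    ∃ k : Nat, (k : Int) = i ∧ k < (h :: t).length ∧ (h :: t)[k]! = b ∧
      (∀ j, j < k → (h :: t)[j]! < b) ∧ (∀ j, j < (h :: t).length → (h :: t)[j]! ≤ b) := by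
  obtain ⟨h1, h2, h3, h4⟩ := pvScan_spec t h 0 1 b i hs
  have hmem : ∀ j, j < t.length → t[j]! ≤ b := by
    intro j hj
    rw [getElem!_pos t j hj]
    exact h2 _ (List.getElem_mem hj)
  by_cases hb : h < b
  · obtain ⟨k, hk, hik, hek, hlt⟩ := h4 hb
    refine ⟨k + 1, by push_cast; omega, by simpa using Nat.succ_lt_succ hk, by simpa using hek, ?_, ?_⟩
    · intro j hj
      cases j with
      | zero => simpa using hb
      | succ j' => simpa using hlt j' (by omega)
    · intro j hj
      cases j with
      | zero => simpa using h1
      | succ j' => simpa using hmem j' (by simpa using hj)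
  · have hbh : b = h := le_antisymm (not_lt.mp hb) h1
    refine ⟨0, by simpa using (h3 hbh).symm, by simp, by simpa using hbh.symm, ?_, ?_⟩
    · intro j hj; omega
    · intro j hj
      cases j with
      | zero => simp [hbh]
      | succ j' => simpa using hmem j' (by simpa using hj)

lemma pv_argmax_unique (r : List Int) (k1 k2 : Nat) (b1 b2 : Int)
    (h1 : k1 < r.length) (e1 : r[k1]! = b1) (lt1 : ∀ j, j < k1 → r[j]! < b1)
    (le1 : ∀ j, j < r.length → r[j]! ≤ b1)
    (h2 : k2 < r.length) (e2 : r[k2]! = b2) (lt2 : ∀ j, j < k2 → r[j]! < b2)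
    (le2 : ∀ j, j < r.length → r[j]! ≤ b2) : k1 = k2 ∧ b1 = b2 := by
  have hb1 : b1 ≤ b2 := by
    have := le2 k1 h1
    rwa [e1] at this
  have hb2 : b2 ≤ b1 := by
    have := le1 k2 h2
    rwa [e2] at this
  have hbb : b1 = b2 := le_antisymm hb1 hb2
  refine ⟨?_, hbb⟩
  rcases Nat.lt_trichotomy k1 k2 with hlt | heq | hgt
  · have := lt2 k1 hlt
    rw [e1] at this
    omega
  · exact heq
  · have := lt1 k2 hgt
    rw [e2] at this
    omega

lemma pv_index?_of_first (r : List Int) (k : Nat) (b : Int) (hk : k < r.length)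
    (he : r[k]! = b) (hlt : ∀ j, j < k → r[j]! < b) :
    PySem.List.index? r b = some k := by
  subst he
  rw [getElem!_pos r k hk]
  rw [PySem.List.index?_eq_some_iff]
  refine ⟨r.take k, r.drop (k + 1), ?_, ?_, ?_⟩
  · conv_lhs => rw [← List.take_append_drop k r]
    rw [← List.getElem_cons_drop hk]
  · simp [List.length_take, Nat.min_eq_left hk.le]
  · intro hmem
    obtain ⟨j, hj, hje⟩ := List.getElem_of_mem hmem
    have hjk : j < k := by
      have := hj
      simp [List.length_take] at this
      omega
    have := hlt j hjk
    rw [getElem!_pos r j (by omega), getElem!_pos r k hk] at this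
    rw [List.getElem_take] at hje
    omega

-- head of an insertBy-insertion depends only on the head of the target
lemma pv_insertBy_head (before : Int → Int → Bool) (v : Int) (ys : List Int) :
    (PySem.List.insertBy before v ys).head? =
      some (match ys with | [] => v | w :: _ => if before v w then v else w) := by
  cases ys with
  | nil => simp [PySem.List.insertBy]
  | cons w t =>
      simp only [PySem.List.insertBy]
      split_ifs <;> simp

-- head of the insertion-sort fold = a running strict-min scan over the input order
lemma pv_foldl_insertBy_head (key : Int → Int) :
    ∀ (xs acc : List Int),
    (xs.foldl (fun acc v => PySem.List.insertBy (fun a b => decide (key a < key b)) v acc) acc).head?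
    = xs.foldl (fun (b : Option Int) v =>
        match b with
        | none => some v
        | some b0 => if key v < key b0 then some v else some b0) acc.head? := by
  intro xs
  induction xs with
  | nil => intro acc; rfl
  | cons v t ih =>
      intro acc
      rw [List.foldl_cons, List.foldl_cons, ih]
      congr 1
      cases acc with
      | nil => simp [PySem.List.insertBy]
      | cons w ws =>
          rw [pv_insertBy_head]
          simp only [List.head?_cons]
          by_cases h : key v < key w
          · simp [h]
          · simp [h]

lemma pv_sorted_head (key : Int → Int) (xs : List Int) :
    (PySem.List.sorted xs key false).head?
    = xs.foldl (fun (b : Option Int) v =>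
        match b with
        | none => some v
        | some b0 => if key v < key b0 then some v else some b0) none := by
  rw [PySem.List.sorted_eq_foldl_insertBy]
  exact pv_foldl_insertBy_head key xs []

-- the running strict-min scan over range(a, len r) with key j ↦ -r[j] is pvScan on r.drop a
lemma pv_kfold (r : List Int) (n : Nat) :
    ∀ (a : Nat), r.length - a = n → a ≤ r.length →
    ∀ (k : Nat) (best : Int), k < r.length → r[k]! = best →
    (PySem.List.pyRange (a : Int) (r.length : Int)).foldl
      (fun (b : Option Int) v =>
        match b with
        | none => some v
        | some b0 => if (-((PySem.List.pyGet? r v).getD 0)) < (-((PySem.List.pyGet? r b0).getD 0))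
                     then some v else some b0)
      (some (k : Int))
    = some (pvScan (r.drop a) best k a).2 := by
  induction n with
  | zero =>
      intro a ha hle k best hk hb
      have haz : a = r.length := by omega
      subst haz
      rw [PySem.List.pyRange_one_eq_nil (le_refl _)]
      simp [pvScan]
  | succ n ih =>
      intro a ha hle k best hk hb
      have hlt : a < r.length := by omega
      rw [PySem.List.pyRange_one_cons (by exact_mod_cast hlt), List.foldl_cons]
      have hga : PySem.List.pyGet? r (a : Int) = some r[a] := by
        rw [PySem.List.pyGet?_natCast]
        exact List.getElem?_eq_getElem hlt
      have hgk : PySem.List.pyGet? r (k : Int) = some r[k] := by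
        rw [PySem.List.pyGet?_natCast]
        exact List.getElem?_eq_getElem hk
      have hdrop : r.drop a = r[a] :: r.drop (a + 1) := (List.getElem_cons_drop hlt).symm
      rw [hdrop]
      have hbk : r[k] = best := by rw [← hb, getElem!_pos r k hk]
      simp only [hga, hgk, Option.getD_some, hbk, pvScan]
      by_cases hc : best < r[a]
      · rw [if_pos (by omega), if_pos hc]
        have : ((a : Int) + 1) = ((a + 1 : Nat) : Int) := by push_cast; ring
        rw [this, ih (a + 1) (by omega) (by omega) a r[a] hlt (getElem!_pos r a hlt)]
      · rw [if_neg (by omega), if_neg hc]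
        have : ((a : Int) + 1) = ((a + 1 : Nat) : Int) := by push_cast; ring
        rw [this, ih (a + 1) (by omega) (by omega) k best hk hb]

-- the front of B's sorted index list is pvScan's index
lemma pv_sorted_front (h : Int) (t : List Int) :
    PySem.List.pyGet? (PySem.List.sorted (PySem.List.pyRange 0 (((h :: t).length : Nat) : Int))
        (fun j => -((PySem.List.pyGet? (h :: t) j).getD 0)) false) (0 : Int)
    = some (pvScan t h 0 1).2 := by
  have hh : ∀ (l : List Int), PySem.List.pyGet? l (0 : Int) = l.head? := by
    intro l
    rw [show (0 : Int) = ((0 : Nat) : Int) from rfl, PySem.List.pyGet?_natCast,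
        List.head?_eq_getElem?]
  rw [hh, pv_sorted_head]
  have h0 : (0 : Int) < (((h :: t).length : Nat) : Int) := by
    simp only [List.length_cons]; push_cast; omega
  rw [PySem.List.pyRange_one_cons h0, List.foldl_cons]
  have e0 : ((0 : Nat) : Int) = (0 : Int) := by norm_num
  have e1 : ((0 : Int) + 1) = ((1 : Nat) : Int) := by norm_num
  have := pv_kfold (h :: t) t.length 1 (by simp) (by simp) 0 h (by simp) (by simp)
  simp only [Nat.cast_one, Nat.cast_zero, List.drop_succ_cons, List.drop_zero] at this
  simpa using this

-- per admissible row, A appends exactly the value B computes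
lemma pv_row_eq (x : List Int) (r : List Int) (hr : PreRow_LoudestBand x r) (highest : List Int) :
    pvRowA x highest r = highest ++ [pvRowB x r] := by
  obtain ⟨i0, hi0r, hi0x, hlt0, hle0⟩ := hr
  unfold pvRowA pvRowB
  cases r with
  | nil => exact absurd hi0r (by simp)
  | cons h t =>
      rcases hp : pvScan t h 0 1 with ⟨b, i⟩
      obtain ⟨k, hki, hkl, hke, hklt, hkle⟩ := pv_scan_argmax h t b i hp
      obtain ⟨hk0, hb0⟩ :=
        pv_argmax_unique (h :: t) k i0 b ((h :: t)[i0]!) hkl hke hklt hkle hi0r rfl hlt0 hle0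
      -- A's side
      have hmax : PySem.List.max? (h :: t) (fun v => v) = some b := by
        rw [PySem.List.max?_id_cons]
        congr 1
        rw [← pvScan_fst t h 0 1, hp]
      have hidx : PySem.List.index? (h :: t) b = some k := pv_index?_of_first (h :: t) k b hkl hke hklt
      have hkx : k < x.length := hk0 ▸ hi0x
      have hget : PySem.List.pyGet? x (k : Int) = some x[k]! := by
        rw [PySem.List.pyGet?_natCast, List.getElem?_eq_getElem hkx, getElem!_pos x k hkx]
      -- B's side
      have hfront := pv_sorted_front h t
      rw [hp] at hfront
      rw [← hki] at hfront
      simp only [hmax, hidx, hget, hfront, Option.getD_some]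

lemma pv_fold_eq (x : List Int) (ys : List (List Int)) :
    ∀ acc : List Int, (∀ r ∈ ys, PreRow_LoudestBand x r) →
    ys.foldl (pvRowA x) acc = acc ++ ys.map (pvRowB x) := by
  induction ys with
  | nil => intro acc _; simp
  | cons r ys ih =>
      intro acc hpre
      simp only [List.foldl_cons, List.map_cons]
      rw [pv_row_eq x r (hpre r (by simp)) acc,
          ih _ (fun r hr => hpre r (List.mem_cons_of_mem _ hr))]
      simp

-- ===== VERDICT (by name: the statement is the Claim_ definition above) =====
theorem LoudestBand_spec : Claim_equal_LoudestBand := by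
  unfold Claim_equal_LoudestBand
  intro x y _ hpre
  unfold Spec_LoudestBand LoudestBand LoudestBand_alt
  simpa using pv_fold_eq x y [] hpre
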